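-- pv_equiv track=rewrite | github.com/DoctorDalek1963/WhatsApp-HTML-Formatter | formatter_functions.py | format_to_html
-- ===== SOURCE A (Python) =====
-- formatDict = {"_": "em", "*": "strong", "~": "del"}  # Dict of format chars with their HTML tags
--
-- def format_to_html(string: str) -> str:
--     """Replace format characters with their HTML tags."""
--     first_tag = True
--     list_string = list(string)
--
--     for char, tag in formatDict.items():
--         if char in string and string.count(char) % 2 == 0:
--             for x, letter in enumerate(list_string):
--                 if letter == char:
--                     if first_tag:
--                         list_string[x] = f"<{tag}>"
--                         first_tag = False
--                     else:
--                         list_string[x] = f"</{tag}>"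
--                         first_tag = True
--
--     return "".join(list_string)
-- ===== SOURCE B (Python) =====
-- formatDict = {"_": "em", "*": "strong", "~": "del"}  # Dict of format chars with their HTML tags
--
--
-- def format_to_html(string: str) -> str:
--     """Replace format characters with their HTML tags (single pass)."""
--     active = {c: tag for c, tag in formatDict.items()
--               if c in string and string.count(c) % 2 == 0}
--     is_open = dict.fromkeys(active, True)
--     out = []
--     for ch in string:
--         if ch in active:
--             tag = active[ch]
--             out.append(f"<{tag}>" if is_open[ch] else f"</{tag}>")
--             is_open[ch] = not is_open[ch]
--         else:
--             out.append(ch)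
--     return "".join(out)
-- ===== Notes on version B (the rewrite author's own statement) =====
-- stated objective: alternative
-- what changed: A makes one full index-mutation pass over the character list for each of the three format chars with a shared open/close flag; B precomputes the dict of active format chars once and builds the output in a single pass over the string with a per-char open/close toggle.
import Mathlib
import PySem

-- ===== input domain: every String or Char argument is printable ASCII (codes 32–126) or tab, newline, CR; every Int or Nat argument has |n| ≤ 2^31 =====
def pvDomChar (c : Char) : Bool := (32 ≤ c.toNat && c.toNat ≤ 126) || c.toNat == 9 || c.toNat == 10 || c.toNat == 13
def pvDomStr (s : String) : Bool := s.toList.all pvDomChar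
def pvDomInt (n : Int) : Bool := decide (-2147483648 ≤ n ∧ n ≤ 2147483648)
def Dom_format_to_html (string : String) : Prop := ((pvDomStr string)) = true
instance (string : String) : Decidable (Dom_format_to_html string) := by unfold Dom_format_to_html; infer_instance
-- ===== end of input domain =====

-- B replaces A's three sequential index-mutation passes (one per format char, shared flag)
-- by one precomputed active-char dict and a single output-building pass with per-char toggles.

-- ===== PORT A =====
-- formatDict = {"_": "em", "*": "strong", "~": "del"}; keys are 1-char strings, modelled as Char
-- (exact: they are only used in 'char in string', 'string.count(char)' and '== letter' on 1-char strings).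
def pvFormatDict : List (Char × String) := [('_', "em"), ('*', "strong"), ('~', "del")]

def pvTagOpen (tag : String) : String := String.ofList ('<' :: tag.toList ++ ['>'])
def pvTagClose (tag : String) : String := String.ofList ('<' :: '/' :: tag.toList ++ ['>'])

-- the inner 'for x, letter in enumerate(list_string)' loop: it only assigns at the cursor
-- position x itself, so it is exactly this structural recursion over the list with the flag
def passA (c : Char) (tag : String) : List String → Bool → List String × Bool
  | [], ft => ([], ft)
  | s :: rest, ft =>
    if s = String.ofList [c] then
      if ft then
        let r := passA c tag rest false
        (pvTagOpen tag :: r.1, r.2)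
      else
        let r := passA c tag rest true
        (pvTagClose tag :: r.1, r.2)
    else
      let r := passA c tag rest ft
      (s :: r.1, r.2)

def format_to_html (string : String) : String :=
  let cs := string.toList
  -- 'char in string' / 'string.count(char)' for a 1-char needle = char membership / char count
  let st := pvFormatDict.foldl
    (fun (st : List String × Bool) p =>
      if cs.contains p.1 && decide (cs.count p.1 % 2 = 0) then passA p.1 p.2 st.1 st.2 else st)
    (cs.map (fun ch => String.ofList [ch]), true)
  PySem.Str.join "" st.1

-- ===== PORT B =====
-- active = {c: tag for c, tag in formatDict.items() if c in string and string.count(c) % 2 == 0}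
def pvActive (cs : List Char) : PySem.Dict Char String :=
  pvFormatDict.foldl
    (fun d p => if cs.contains p.1 && decide (cs.count p.1 % 2 = 0) then d.insert p.1 p.2 else d)
    PySem.Dict.empty

-- is_open = dict.fromkeys(active, True)
def pvIsOpen0 (active : PySem.Dict Char String) : PySem.Dict Char Bool :=
  active.keys.foldl (fun d k => d.insert k true) PySem.Dict.empty

def format_to_html_alt (string : String) : String :=
  let cs := string.toList
  let active := pvActive cs
  let st := cs.foldl
    (fun (st : List String × PySem.Dict Char Bool) ch =>
      if active.contains ch then
        let tag := (active.get? ch).getD ""      -- active[ch]: key present whenever read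
        let o := (st.2.get? ch).getD true        -- is_open[ch]: key present whenever read
        (st.1 ++ [if o then pvTagOpen tag else pvTagClose tag], st.2.insert ch (!o))
      else
        (st.1 ++ [String.ofList [ch]], st.2))
    ([], pvIsOpen0 active)
  PySem.Str.join "" st.1

-- ===== PRECONDITION & SPEC =====
def Spec_format_to_html (string : String) (out : String) : Prop := out = format_to_html_alt string
instance (string : String) (out : String) : Decidable (Spec_format_to_html string out) := by unfold Spec_format_to_html; infer_instance

-- ===== CLAIM (what is proved, stated in full; the proofs are below) =====
def Claim_equal_format_to_html : Prop := ∀ (string : String), Dom_format_to_html string → Spec_format_to_html string (format_to_html string)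

-- ===== LEMMAS AND PROOFS =====


-- sing: the singleton-string view of a char (proof-side abbreviation fact)
lemma pvSing_ne {a b : Char} (h : a ≠ b) : String.ofList [a] ≠ String.ofList [b] := by
  simpa [String.ofList_inj] using h

lemma pvCount_map_sing (cs : List Char) (c : Char) :
    (cs.map (fun ch => String.ofList [ch])).count (String.ofList [c]) = cs.count c := by
  exact List.count_map_of_injective cs (fun ch => String.ofList [ch])
    (fun a b h => by simpa [String.ofList_inj] using h) c

-- A's activity condition for a format char
def pvA (cs : List Char) (c : Char) : Bool := cs.contains c && decide (cs.count c % 2 = 0)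

-- one conditional pass of A, output list only
def stepIf (b : Bool) (c : Char) (t : String) (L : List String) (f : Bool) : List String :=
  if b then (passA c t L f).1 else L

lemma stepIf_nil (b : Bool) (c : Char) (t : String) (f : Bool) : stepIf b c t [] f = [] := by
  cases b <;> simp [stepIf, passA]

lemma stepIf_cons_ne (b : Bool) (c : Char) (t : String) {s : String}
    (h : s ≠ String.ofList [c]) (L : List String) (f : Bool) :
    stepIf b c t (s :: L) f = s :: stepIf b c t L f := by
  cases b <;> simp [stepIf, passA, h]

lemma stepIf_true_cons_eq (c : Char) (t : String) (L : List String) (f : Bool) :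
    stepIf true c t (String.ofList [c] :: L) f
      = (if f then pvTagOpen t else pvTagClose t) :: stepIf true c t L (!f) := by
  cases f <;> simp [stepIf, passA]

-- flag after a full pass: flips once per matching element
lemma passA_snd (c : Char) (t : String) : ∀ (L : List String) (f : Bool),
    (passA c t L f).2 = if L.count (String.ofList [c]) % 2 = 0 then f else !f := by
  intro L
  induction L with
  | nil => intro f; simp [passA]
  | cons s rest ih =>
    intro f
    by_cases hs : s = String.ofList [c]
    · subst hs
      by_cases hp : rest.count (String.ofList [c]) % 2 = 0 <;>
        cases f <;> simp [passA, ih, hp, Nat.add_mod] <;> omega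
    · simp [passA, hs, ih]

-- B's loop, output list only (act.contains written through get? for the proofs)
def bRun (act : PySem.Dict Char String) : List Char → PySem.Dict Char Bool → List String
  | [], _ => []
  | ch :: rest, d =>
    match act.get? ch with
    | some tag =>
        (if (d.get? ch).getD true then pvTagOpen tag else pvTagClose tag)
          :: bRun act rest (d.insert ch (!(d.get? ch).getD true))
    | none => String.ofList [ch] :: bRun act rest d

lemma bRun_cons_some (act : PySem.Dict Char String) {ch : Char} {tag : String}
    (h : act.get? ch = some tag) (l : List Char) (d : PySem.Dict Char Bool) :
    bRun act (ch :: l) d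
      = (if (d.get? ch).getD true then pvTagOpen tag else pvTagClose tag)
          :: bRun act l (d.insert ch (!(d.get? ch).getD true)) := by
  simp [bRun, h]

lemma bRun_cons_none (act : PySem.Dict Char String) {ch : Char}
    (h : act.get? ch = none) (l : List Char) (d : PySem.Dict Char Bool) :
    bRun act (ch :: l) d = String.ofList [ch] :: bRun act l d := by
  simp [bRun, h]

-- B's foldl accumulates out ++ bRun
lemma pvBfold (act : PySem.Dict Char String) : ∀ (l : List Char) (out : List String) (d : PySem.Dict Char Bool),
    (l.foldl
      (fun (st : List String × PySem.Dict Char Bool) ch =>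
        if act.contains ch then
          let tag := (act.get? ch).getD ""
          let o := (st.2.get? ch).getD true
          (st.1 ++ [if o then pvTagOpen tag else pvTagClose tag], st.2.insert ch (!o))
        else
          (st.1 ++ [String.ofList [ch]], st.2))
      (out, d)).1 = out ++ bRun act l d := by
  intro l
  induction l with
  | nil => intro out d; simp [bRun]
  | cons ch rest ih =>
    intro out d
    rcases hg : act.get? ch with _ | tag
    · have hc : act.contains ch = false := by
        rw [PySem.Dict.contains_eq_isSome_get?, hg]; rfl
      simp [List.foldl, hc, ih, bRun_cons_none act hg]
    · have hc : act.contains ch = true := by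
        rw [PySem.Dict.contains_eq_isSome_get?, hg]; rfl
      simp [List.foldl, hc, hg, ih, bRun_cons_some act hg]

-- pvActive's lookups, characterised by the three activity bits
lemma pvActive_get_u (cs : List Char) :
    (pvActive cs).get? '_' = if pvA cs '_' then some "em" else none := by
  simp only [pvActive, pvFormatDict, pvA, List.foldl]
  split_ifs <;> rfl

lemma pvActive_get_s (cs : List Char) :
    (pvActive cs).get? '*' = if pvA cs '*' then some "strong" else none := by
  simp only [pvActive, pvFormatDict, pvA, List.foldl]
  split_ifs <;> rfl

lemma pvActive_get_t (cs : List Char) :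
    (pvActive cs).get? '~' = if pvA cs '~' then some "del" else none := by
  simp only [pvActive, pvFormatDict, pvA, List.foldl]
  split_ifs <;> rfl

lemma pvActive_get_other (cs : List Char) (ch : Char)
    (hu : ch ≠ '_') (hs : ch ≠ '*') (ht : ch ≠ '~') : (pvActive cs).get? ch = none := by
  simp only [pvActive, pvFormatDict, List.foldl]
  split_ifs <;>
    simp [PySem.Dict.get?_insert_of_ne, hu, hs, ht, PySem.Dict.get?_empty]

-- every toggle in is_open starts at True
lemma pvIsOpen0_getD_aux : ∀ (ks : List Char) (d : PySem.Dict Char Bool),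
    (∀ c, ((d.get? c).getD true) = true) →
    ∀ c, (((ks.foldl (fun d k => d.insert k true) d).get? c).getD true) = true := by
  intro ks
  induction ks with
  | nil => intro d hd c; exact hd c
  | cons k rest ih =>
    intro d hd c
    refine ih (d.insert k true) ?_ c
    intro c'
    by_cases hc : c' = k
    · subst hc; simp [PySem.Dict.get?_insert_self]
    · simp [PySem.Dict.get?_insert_of_ne _ _ hc, hd c']

lemma pvIsOpen0_getD (act : PySem.Dict Char String) (c : Char) :
    (((pvIsOpen0 act).get? c).getD true) = true := by
  refine pvIsOpen0_getD_aux act.keys PySem.Dict.empty ?_ c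
  intro c'; simp [PySem.Dict.get?_empty]

-- MAIN: A's three conditional passes = B's single pass
lemma pvMain (a1 a2 a3 : Bool) (act : PySem.Dict Char String)
    (h1 : act.get? '_' = if a1 then some "em" else none)
    (h2 : act.get? '*' = if a2 then some "strong" else none)
    (h3 : act.get? '~' = if a3 then some "del" else none)
    (h0 : ∀ ch, ch ≠ '_' → ch ≠ '*' → ch ≠ '~' → act.get? ch = none) :
    ∀ (l : List Char) (f1 f2 f3 : Bool) (d : PySem.Dict Char Bool),
      (a1 = true → (d.get? '_').getD true = f1) →
      (a2 = true → (d.get? '*').getD true = f2) →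
      (a3 = true → (d.get? '~').getD true = f3) →
      stepIf a3 '~' "del"
        (stepIf a2 '*' "strong"
          (stepIf a1 '_' "em" (l.map (fun ch => String.ofList [ch])) f1) f2) f3
        = bRun act l d := by
  intro l
  induction l with
  | nil => intro f1 f2 f3 d _ _ _; simp [stepIf_nil, bRun]
  | cons ch rest ih =>
    intro f1 f2 f3 d hd1 hd2 hd3
    simp only [List.map_cons]
    by_cases hu : ch = '_'
    · subst hu
      cases ha1 : a1 with
      | false =>
        rw [ha1] at h1 hd1 ih
        rw [show stepIf false '_' "em" ((String.ofList ['_']) :: rest.map (fun ch => String.ofList [ch])) f1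
              = (String.ofList ['_']) :: stepIf false '_' "em" (rest.map (fun ch => String.ofList [ch])) f1 from by simp [stepIf],
            stepIf_cons_ne a2 '*' "strong" (by decide),
            stepIf_cons_ne a3 '~' "del" (by decide),
            bRun_cons_none act (by simpa using h1),
            ih f1 f2 f3 d (by simp) hd2 hd3]
      | true =>
        rw [ha1] at h1 hd1 ih
        rw [stepIf_true_cons_eq '_' "em",
            stepIf_cons_ne a2 '*' "strong" (by cases f1 <;> decide),
            stepIf_cons_ne a3 '~' "del" (by cases f1 <;> decide),
            bRun_cons_some act (by simpa using h1),
            hd1 rfl,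
            ih (!f1) f2 f3 (d.insert '_' (!f1))
              (by intro _; simp [PySem.Dict.get?_insert_self])
              (by intro h; rw [PySem.Dict.get?_insert_of_ne _ _ (by decide)]; exact hd2 h)
              (by intro h; rw [PySem.Dict.get?_insert_of_ne _ _ (by decide)]; exact hd3 h)]
    · by_cases hs : ch = '*'
      · subst hs
        cases ha2 : a2 with
        | false =>
          rw [ha2] at h2 hd2 ih
          rw [stepIf_cons_ne a1 '_' "em" (by decide),
              show stepIf false '*' "strong" ((String.ofList ['*']) :: stepIf a1 '_' "em" (rest.map (fun ch => String.ofList [ch])) f1) f2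
                = (String.ofList ['*']) :: stepIf false '*' "strong" (stepIf a1 '_' "em" (rest.map (fun ch => String.ofList [ch])) f1) f2 from by simp [stepIf],
              stepIf_cons_ne a3 '~' "del" (by decide),
              bRun_cons_none act (by simpa using h2),
              ih f1 f2 f3 d hd1 (by simp) hd3]
        | true =>
          rw [ha2] at h2 hd2 ih
          rw [stepIf_cons_ne a1 '_' "em" (by decide),
              stepIf_true_cons_eq '*' "strong",
              stepIf_cons_ne a3 '~' "del" (by cases f2 <;> decide),
              bRun_cons_some act (by simpa using h2),
              hd2 rfl,
              ih f1 (!f2) f3 (d.insert '*' (!f2))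
                (by intro h; rw [PySem.Dict.get?_insert_of_ne _ _ (by decide)]; exact hd1 h)
                (by intro _; simp [PySem.Dict.get?_insert_self])
                (by intro h; rw [PySem.Dict.get?_insert_of_ne _ _ (by decide)]; exact hd3 h)]
      · by_cases ht : ch = '~'
        · subst ht
          cases ha3 : a3 with
          | false =>
            rw [ha3] at h3 hd3 ih
            rw [stepIf_cons_ne a1 '_' "em" (by decide),
                stepIf_cons_ne a2 '*' "strong" (by decide),
                show stepIf false '~' "del" ((String.ofList ['~']) :: stepIf a2 '*' "strong" (stepIf a1 '_' "em" (rest.map (fun ch => String.ofList [ch])) f1) f2) f3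
                  = (String.ofList ['~']) :: stepIf false '~' "del" (stepIf a2 '*' "strong" (stepIf a1 '_' "em" (rest.map (fun ch => String.ofList [ch])) f1) f2) f3 from by simp [stepIf],
                bRun_cons_none act (by simpa using h3),
                ih f1 f2 f3 d hd1 hd2 (by simp)]
          | true =>
            rw [ha3] at h3 hd3 ih
            rw [stepIf_cons_ne a1 '_' "em" (by decide),
                stepIf_cons_ne a2 '*' "strong" (by decide),
                stepIf_true_cons_eq '~' "del",
                bRun_cons_some act (by simpa using h3),
                hd3 rfl,
                ih f1 f2 (!f3) (d.insert '~' (!f3))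
                  (by intro h; rw [PySem.Dict.get?_insert_of_ne _ _ (by decide)]; exact hd1 h)
                  (by intro h; rw [PySem.Dict.get?_insert_of_ne _ _ (by decide)]; exact hd2 h)
                  (by intro _; simp [PySem.Dict.get?_insert_self])]
        · rw [stepIf_cons_ne a1 '_' "em" (pvSing_ne hu),
              stepIf_cons_ne a2 '*' "strong" (pvSing_ne hs),
              stepIf_cons_ne a3 '~' "del" (pvSing_ne ht),
              bRun_cons_none act (h0 ch hu hs ht),
              ih f1 f2 f3 d hd1 hd2 hd3]

-- counts of other strings survive a pass
lemma passA_count (c : Char) (t : String) (s : String) (hc : s ≠ String.ofList [c])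
    (ho : s ≠ pvTagOpen t) (hcl : s ≠ pvTagClose t) :
    ∀ (L : List String) (f : Bool), ((passA c t L f).1).count s = L.count s := by
  intro L
  induction L with
  | nil => intro f; simp [passA]
  | cons hd rest ih =>
    intro f
    by_cases hh : hd = String.ofList [c]
    · subst hh
      cases f <;>
        simp [passA, ih, Ne.symm hc, Ne.symm ho, Ne.symm hcl]
    · simp [passA, hh, List.count_cons, ih]

-- A's fold in stepIf form (all three passes start and end with the flag True)
lemma pvA_eq (string : String) :
    format_to_html string
      = PySem.Str.join ""
          (stepIf (pvA string.toList '~') '~' "del"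
            (stepIf (pvA string.toList '*') '*' "strong"
              (stepIf (pvA string.toList '_') '_' "em"
                (string.toList.map (fun ch => String.ofList [ch])) true) true) true) := by
  unfold format_to_html
  simp only [pvFormatDict, List.foldl, stepIf, pvA]
  have pc1 := passA_count '_' "em" (String.ofList ['*']) (by decide) (by decide) (by decide)
  have pc2 := passA_count '_' "em" (String.ofList ['~']) (by decide) (by decide) (by decide)
  have pc3 := passA_count '*' "strong" (String.ofList ['~']) (by decide) (by decide) (by decide)
  have cm1 : List.count "_" (string.toList.map (fun ch => String.ofList [ch])) = string.toList.count '_' := by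
    simpa using pvCount_map_sing string.toList '_'
  have cm2 : List.count "*" (string.toList.map (fun ch => String.ofList [ch])) = string.toList.count '*' := by
    simpa using pvCount_map_sing string.toList '*'
  have cm3 : List.count "~" (string.toList.map (fun ch => String.ofList [ch])) = string.toList.count '~' := by
    simpa using pvCount_map_sing string.toList '~'
  split_ifs <;>
    simp_all [passA_snd]

-- B's fold in bRun form
lemma pvB_eq (string : String) :
    format_to_html_alt string
      = PySem.Str.join "" (bRun (pvActive string.toList) string.toList (pvIsOpen0 (pvActive string.toList))) := by
  dsimp only [format_to_html_alt]
  rw [pvBfold]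
  simp

-- ===== VERDICT (by name: the statement is the Claim_ definition above) =====
theorem format_to_html_spec : Claim_equal_format_to_html := by
  intro string _
  unfold Spec_format_to_html
  rw [pvA_eq, pvB_eq]
  congr 1
  exact pvMain (pvA string.toList '_') (pvA string.toList '*') (pvA string.toList '~')
    (pvActive string.toList)
    (pvActive_get_u string.toList) (pvActive_get_s string.toList) (pvActive_get_t string.toList)
    (pvActive_get_other string.toList)
    string.toList true true true (pvIsOpen0 (pvActive string.toList))
    (fun _ => pvIsOpen0_getD _ '_') (fun _ => pvIsOpen0_getD _ '*') (fun _ => pvIsOpen0_getD _ '~')
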